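-- pv_equiv track=rewrite | github.com/Sernikjamnika/cryptography | list1/ex1/prng/lcg.py | get_modulus
-- ===== SOURCE A (Python) =====
-- import typing
-- import math
--
-- def get_modulus(generated_sequence: typing.Tuple[int]) -> int:
--     """
--     Gets modulus of LCG from given sequence.
--
--     Utilizes number theory fact that given few random multiples of n,
--     there is a large probability that their gcd is equal to n. And fact
--     that if and only if X = 0 (mod modulus) then X = k * modulus.
--
--     So that transforms sequence into sequence of differences such that
--     difference[0] = sequence[1] - sequence[0]
--     and
--     difference[1] = sequence[2] - sequence[1] =
--     = multiplier * (sequence[1] - sequence[0]) (mod modulus)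
--
--     Then transforms differences to make them equivalent to 0 mod modulus.
--     difference[2] * differnece[0] - difference[1]^2 =
--     = (multiplier * differnece[0])^2 - (multiplier * differnece[0])^2 = 0 (mod modulus)
--     """
--     differences = [
--         value_next - value_now
--         for value_now, value_next in zip(generated_sequence, generated_sequence[1:])
--     ]
--     modulus_multiplied_differences = [
--         third * first - second ** 2
--         for first, second, third in zip(differences, differences[1:], differences[2:])
--     ]
--
--     modulus = math.gcd(*modulus_multiplied_differences[:2])
--     for difference in modulus_multiplied_differences[2:]:
--         modulus = math.gcd(modulus, difference)
--     return abs(modulus)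
-- ===== SOURCE B (Python) =====
-- import math
--
-- def get_modulus(generated_sequence):
--     # Balanced divide-and-conquer gcd reduction over 4-element windows of the raw
--     # sequence (no intermediate difference/product lists; terms computed by index).
--     s = list(generated_sequence)
--
--     def g(lo, hi):
--         if hi <= lo:
--             return 0
--         if hi == lo + 1:
--             i = lo
--             return abs((s[i + 3] - s[i + 2]) * (s[i + 1] - s[i])
--                        - (s[i + 2] - s[i + 1]) ** 2)
--         mid = (lo + hi) // 2
--         return math.gcd(g(lo, mid), g(mid, hi))
--
--     return g(0, max(len(s) - 3, 0))
-- ===== Notes on version B (the rewrite author's own statement) =====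
-- stated objective: alternative
-- what changed: Replaced A's staged pipeline (difference list, product list, seeded left-to-right gcd reduction, final abs) by a balanced divide-and-conquer gcd reduction over window terms computed directly from the sequence by index, correct because gcd is associative and commutative.
import Mathlib
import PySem

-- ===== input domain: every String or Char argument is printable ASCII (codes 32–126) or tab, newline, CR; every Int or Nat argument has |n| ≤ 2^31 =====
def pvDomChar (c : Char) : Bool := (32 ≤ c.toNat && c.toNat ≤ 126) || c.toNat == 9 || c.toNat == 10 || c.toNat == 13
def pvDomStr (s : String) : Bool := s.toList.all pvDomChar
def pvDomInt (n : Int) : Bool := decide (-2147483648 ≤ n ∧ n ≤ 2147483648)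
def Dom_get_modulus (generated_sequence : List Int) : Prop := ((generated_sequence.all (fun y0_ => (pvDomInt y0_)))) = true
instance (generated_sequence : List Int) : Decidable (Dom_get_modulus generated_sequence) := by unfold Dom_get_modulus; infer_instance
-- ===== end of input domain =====

-- B replaces A's staged comprehensions (difference list, product list) plus a left-to-right
-- gcd reduction by a balanced divide-and-conquer gcd over window terms computed directly
-- from the sequence by index (objective: alternative).

-- ===== PORT A =====
-- math.gcd on ints returns a nonnegative int; ported as (Int.gcd · · : Nat) cast to Int.
def get_modulus (generated_sequence : List Int) : Int :=
  let differences :=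
    (generated_sequence.zip (generated_sequence.drop 1)).map
      (fun p => p.2 - p.1)
  let modulus_multiplied_differences :=
    ((differences.zip (differences.drop 1)).zip (differences.drop 2)).map
      (fun p => p.2 * p.1.1 - p.1.2 ^ 2)
  -- math.gcd(*md[:2]) : 0 args → 0, 1 arg → |a|, 2 args → gcd a b
  let modulus : Int :=
    match modulus_multiplied_differences.take 2 with
    | [] => 0
    | [a] => ((Int.gcd a 0 : Nat) : Int)
    | a :: b :: _ => ((Int.gcd a b : Nat) : Int)
  let modulus :=
    (modulus_multiplied_differences.drop 2).foldl
      (fun m d => ((Int.gcd m d : Nat) : Int)) modulus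
  |modulus|

-- ===== PORT B =====
-- the leaf term of Source B's g: (s[i+3]-s[i+2])*(s[i+1]-s[i]) - (s[i+2]-s[i+1])**2;
-- plain indexing ported via getD (the recursion only ever produces in-range indices)
def pvTerm (s : List Int) (i : Nat) : Int :=
  (s.getD (i + 3) 0 - s.getD (i + 2) 0) * (s.getD (i + 1) 0 - s.getD i 0)
    - (s.getD (i + 2) 0 - s.getD (i + 1) 0) ^ 2

-- Source B's recursive g(lo, hi); lo/hi are nonnegative throughout, ported as Nat
def gTree (s : List Int) (lo hi : Nat) : Int :=
  if hi ≤ lo then 0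
  else if hi = lo + 1 then |pvTerm s lo|
  else
    ((Int.gcd (gTree s lo ((lo + hi) / 2)) (gTree s ((lo + hi) / 2) hi) : Nat) : Int)
termination_by hi - lo
decreasing_by all_goals omega

-- max(len(s) - 3, 0) on Python ints = Nat truncated subtraction on the length
def get_modulus_alt (generated_sequence : List Int) : Int :=
  gTree generated_sequence 0 (generated_sequence.length - 3)

-- ===== PRECONDITION & SPEC =====
def Spec_get_modulus (generated_sequence : List Int) (out : Int) : Prop := out = get_modulus_alt generated_sequence
instance (generated_sequence : List Int) (out : Int) : Decidable (Spec_get_modulus generated_sequence out) := by unfold Spec_get_modulus; infer_instance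

-- ===== CLAIM (what is proved, stated in full; the proofs are below) =====
def Claim_equal_get_modulus : Prop := ∀ (generated_sequence : List Int), Dom_get_modulus generated_sequence → Spec_get_modulus generated_sequence (get_modulus generated_sequence)

-- ===== LEMMAS AND PROOFS =====

-- common abbreviation for the gcd step
def gcdI (m d : Int) : Int := ((Int.gcd m d : Nat) : Int)

def listGcd (l : List Int) : Int := l.foldl gcdI 0

theorem gcdI_nonneg (a b : Int) : 0 ≤ gcdI a b := Int.natCast_nonneg _

theorem gcdI_zero (a : Int) : gcdI 0 a = |a| := by
  show ((Nat.gcd 0 a.natAbs : Nat) : Int) = |a|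
  rw [Nat.gcd_zero_left]
  exact (Int.abs_eq_natAbs a).symm

theorem gcdI_abs_left (a b : Int) : gcdI |a| b = gcdI a b := by
  simp [gcdI, Int.gcd, Int.natAbs_abs]

theorem gcdI_assoc (a b c : Int) : gcdI (gcdI a b) c = gcdI a (gcdI b c) := by
  simp [gcdI, Int.gcd, Nat.gcd_assoc]

theorem listGcd_nonneg (l : List Int) : 0 ≤ listGcd l := by
  have h : ∀ (l : List Int) (a : Int), 0 ≤ a → 0 ≤ l.foldl gcdI a := by
    intro l
    induction l with
    | nil => intro a h; simpa using h
    | cons x t ih => intro a h; exact ih _ (gcdI_nonneg _ _)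
  exact h l 0 le_rfl

theorem foldl_gcdI_eq (l : List Int) : ∀ (a : Int), 0 ≤ a →
    l.foldl gcdI a = gcdI a (listGcd l) := by
  induction l with
  | nil =>
      intro a ha
      simp [listGcd, gcdI, Int.gcd, Int.natAbs_of_nonneg ha]
  | cons x t ih =>
      intro a ha
      show t.foldl gcdI (gcdI a x) = gcdI a (listGcd (x :: t))
      rw [ih _ (gcdI_nonneg _ _)]
      have h2 : listGcd (x :: t) = gcdI (gcdI 0 x) (listGcd t) := by
        show t.foldl gcdI (gcdI 0 x) = _
        exact ih _ (gcdI_nonneg _ _)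
      rw [h2, gcdI_zero, gcdI_abs_left, gcdI_assoc]

theorem listGcd_append (X Y : List Int) :
    listGcd (X ++ Y) = gcdI (listGcd X) (listGcd Y) := by
  show (X ++ Y).foldl gcdI 0 = _
  rw [List.foldl_append]
  exact foldl_gcdI_eq Y _ (listGcd_nonneg X)

theorem gTree_eq (s : List Int) : ∀ (n lo hi : Nat), hi - lo ≤ n →
    gTree s lo hi = listGcd ((List.range' lo (hi - lo)).map (pvTerm s)) := by
  intro n
  induction n with
  | zero =>
      intro lo hi h
      have hle : hi ≤ lo := by omega
      rw [gTree]
      simp [hle, Nat.sub_eq_zero_of_le hle, listGcd]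
  | succ n ih =>
      intro lo hi h
      rw [gTree]
      by_cases h0 : hi ≤ lo
      · simp [h0, Nat.sub_eq_zero_of_le h0, listGcd]
      · by_cases h1 : hi = lo + 1
        · subst h1
          simp only [h0, if_false]
          simp [listGcd, gcdI_zero]
        · simp only [h0, if_false, h1, if_false]
          have hmid1 : lo < (lo + hi) / 2 := by omega
          have hmid2 : (lo + hi) / 2 < hi := by omega
          rw [ih lo ((lo + hi) / 2) (by omega), ih ((lo + hi) / 2) hi (by omega)]
          show gcdI _ _ = _
          rw [← listGcd_append, ← List.map_append]
          have hr : List.range' lo ((lo + hi) / 2 - lo) ++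
              List.range' ((lo + hi) / 2) (hi - (lo + hi) / 2)
              = List.range' lo (hi - lo) := by
            have hmid : lo + 1 * ((lo + hi) / 2 - lo) = (lo + hi) / 2 := by omega
            rw [show hi - lo = ((lo + hi) / 2 - lo) + (hi - (lo + hi) / 2) from by omega,
                ← List.range'_append, hmid]
          rw [hr]

-- A's "gcd(*md[:2]) then fold then abs" equals listGcd
theorem a_reduce (md : List Int) :
    (|(md.drop 2).foldl gcdI
        (match md.take 2 with
         | [] => (0 : Int)
         | [a] => ((Int.gcd a 0 : Nat) : Int)
         | a :: b :: _ => ((Int.gcd a b : Nat) : Int))|)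
    = listGcd md := by
  match md with
  | [] => rfl
  | [a] =>
      show |((Int.gcd a 0 : Nat) : Int)| = gcdI 0 a
      rw [gcdI_zero]
      show |(((Nat.gcd a.natAbs 0 : Nat)) : Int)| = _
      rw [Nat.gcd_zero_right, abs_of_nonneg (Int.natCast_nonneg _)]
      exact (Int.abs_eq_natAbs a).symm
  | a :: b :: t =>
      show |t.foldl gcdI ((Int.gcd a b : Nat) : Int)| = t.foldl gcdI (gcdI (gcdI 0 a) b)
      have h1 : gcdI (gcdI 0 a) b = ((Int.gcd a b : Nat) : Int) := by
        rw [gcdI_zero, gcdI_abs_left]; rfl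
      rw [h1, abs_of_nonneg]
      have : 0 ≤ ((Int.gcd a b : Nat) : Int) := Int.natCast_nonneg _
      have h : ∀ (l : List Int) (a : Int), 0 ≤ a → 0 ≤ l.foldl gcdI a := by
        intro l
        induction l with
        | nil => intro a h; simpa using h
        | cons x t ih => intro a h; exact ih _ (gcdI_nonneg _ _)
      exact h t _ this

def diffsOf (s : List Int) : List Int :=
  (s.zip (s.drop 1)).map (fun p => p.2 - p.1)

def mdTri (d : List Int) : List Int :=
  ((d.zip (d.drop 1)).zip (d.drop 2)).map (fun p => p.2 * p.1.1 - p.1.2 ^ 2)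

theorem get_modulus_eq_fold (s : List Int) :
    get_modulus s = listGcd (mdTri (diffsOf s)) := by
  show (|((mdTri (diffsOf s)).drop 2).foldl gcdI _|) = _
  exact a_reduce (mdTri (diffsOf s))

theorem diffsOf_length (s : List Int) : (diffsOf s).length = s.length - 1 := by
  simp [diffsOf]

theorem diffsOf_getElem (s : List Int) (i : Nat) (h : i < (diffsOf s).length) :
    (diffsOf s)[i] = s[i + 1]'(by have hh := diffsOf_length s; omega)
      - s[i]'(by have hh := diffsOf_length s; omega) := by
  simp [diffsOf]

theorem mdTri_length (d : List Int) : (mdTri d).length = d.length - 2 := by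
  simp [mdTri]; omega

theorem mdTri_getElem (d : List Int) (i : Nat) (h : i < (mdTri d).length) :
    (mdTri d)[i] = d[2 + i]'(by have hh := mdTri_length d; omega)
      * d[i]'(by have hh := mdTri_length d; omega)
      - (d[1 + i]'(by have hh := mdTri_length d; omega)) ^ 2 := by
  simp [mdTri, Nat.add_comm]

theorem md_eq_terms (s : List Int) :
    mdTri (diffsOf s) = (List.range' 0 (s.length - 3)).map (pvTerm s) := by
  apply List.ext_getElem
  · simp [mdTri_length, diffsOf_length]; omega
  · intro i h1 h2
    have hlen : (mdTri (diffsOf s)).length = s.length - 3 := by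
      simp [mdTri_length, diffsOf_length]; omega
    have hi : i < s.length - 3 := by omega
    have hdl : (diffsOf s).length = s.length - 1 := diffsOf_length s
    have hd : ∀ (j : Nat) (hj : j < (diffsOf s).length),
        (diffsOf s)[j]'hj = s.getD (j + 1) 0 - s.getD j 0 := by
      intro j hj
      have hj' : j + 1 < s.length := by rw [hdl] at hj; omega
      rw [diffsOf_getElem s j hj, List.getD_eq_getElem s 0 hj',
          List.getD_eq_getElem s 0 (by omega)]
    rw [mdTri_getElem (diffsOf s) i h1]
    rw [hd i (by omega), hd (1 + i) (by omega), hd (2 + i) (by omega)]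
    rw [show (1 + i) + 1 = i + 2 from by omega, show 1 + i = i + 1 from by omega,
        show (2 + i) + 1 = i + 3 from by omega, show 2 + i = i + 2 from by omega]
    have : ((List.range' 0 (s.length - 3)).map (pvTerm s))[i]'h2 = pvTerm s i := by
      simp
    rw [this]
    simp only [pvTerm]

theorem get_modulus_alt_eq (s : List Int) :
    get_modulus_alt s = listGcd ((List.range' 0 (s.length - 3)).map (pvTerm s)) := by
  show gTree s 0 (s.length - 3) = _
  have := gTree_eq s (s.length - 3) 0 (s.length - 3) (by omega)
  simpa using this

-- ===== VERDICT (by name: the statement is the Claim_ definition above) =====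
theorem get_modulus_spec : Claim_equal_get_modulus := by
  intro s _
  show get_modulus s = get_modulus_alt s
  rw [get_modulus_eq_fold, get_modulus_alt_eq, md_eq_terms]
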